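-- pv_equiv track=rewrite | github.com/MartinusChoi/Algorithm-PlayGround | Algorithm/Data_Structure/hash/practice_6.py | get_hash_per_genre
-- ===== SOURCE A (Python) =====
-- def get_hash_per_genre(genres:list, plays:list)->list:
--     hash_table = {}
--     for idx, entity in enumerate(zip(genres, plays)):
--         genre, play = entity[0], entity[1]
--         if genre in hash_table:
--             if play in hash_table[genre]: hash_table[genre][play].append(idx)
--             else: hash_table[genre][play] = [idx]
--         else: hash_table[genre] = {play:[idx]}
--
--     for genre, play in zip(genres, plays):
--         if len(hash_table[genre][play]) >= 2: hash_table[genre][play] = sorted(hash_table[genre][play])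
--
--     return hash_table
-- ===== SOURCE B (Python) =====
-- def get_hash_per_genre(genres: list, plays: list) -> list:
--     pairs = list(zip(genres, plays))
--     return {g: {p: [i for i, q in enumerate(pairs) if q == (g, p)]
--                 for p in dict.fromkeys(q[1] for q in pairs if q[0] == g)}
--             for g in dict.fromkeys(q[0] for q in pairs)}
-- ===== Notes on version B (the rewrite author's own statement) =====
-- stated objective: simpler
-- what changed: B builds no mutable dicts at all: it computes the result directly as a nested comprehension, taking first-occurrence-ordered distinct genres (dict.fromkeys), then distinct plays within each genre, and for each (genre,play) the index list by one filter scan over enumerate(pairs); A's incremental nested-dict mutation and its redundant re-sorting second pass disappear.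
import Mathlib
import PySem

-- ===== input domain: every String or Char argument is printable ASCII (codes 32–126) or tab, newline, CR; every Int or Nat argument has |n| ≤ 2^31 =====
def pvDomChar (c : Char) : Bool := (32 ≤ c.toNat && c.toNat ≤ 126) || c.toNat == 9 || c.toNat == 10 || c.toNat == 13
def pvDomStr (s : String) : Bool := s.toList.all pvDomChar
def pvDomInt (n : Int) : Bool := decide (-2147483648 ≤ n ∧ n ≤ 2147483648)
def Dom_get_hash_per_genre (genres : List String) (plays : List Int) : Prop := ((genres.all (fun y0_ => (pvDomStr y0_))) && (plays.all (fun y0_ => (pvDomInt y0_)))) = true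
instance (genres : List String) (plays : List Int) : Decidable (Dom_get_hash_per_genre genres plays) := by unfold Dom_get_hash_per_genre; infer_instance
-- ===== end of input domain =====

-- B replaces A's incremental nested-dict mutation (and its redundant re-sort pass) by a direct
-- nested comprehension over first-occurrence-distinct genres and plays, each index list found by a filter scan.

-- ===== PORT A =====
def get_hash_per_genre (genres : List String) (plays : List Int) : List (String × List (Int × List Int)) :=
  let hash_table : PySem.Dict String (PySem.Dict Int (List Int)) :=
    (PySem.List.enumerate (genres.zip plays)).foldl (fun hash_table q =>
      let idx := q.1
      let genre := q.2.1
      let play := q.2.2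
      match hash_table.get? genre with
      | some inner =>
          match inner.get? play with
          | some l => hash_table.insert genre (inner.insert play (l ++ [idx]))
          | none   => hash_table.insert genre (inner.insert play [idx])
      | none => hash_table.insert genre (PySem.Dict.ofList [(play, [idx])])) PySem.Dict.empty
  let hash_table2 :=
    (genres.zip plays).foldl (fun ht gp =>
      -- hash_table[genre][play]: both keys are always present in this pass, so getD is exact here
      let inner := ht.getD gp.1 PySem.Dict.empty
      let l := inner.getD gp.2 []
      if 2 ≤ l.length then ht.insert gp.1 (inner.insert gp.2 (PySem.List.sorted l (fun x => x)))
      else ht) hash_table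
  hash_table2.items.map (fun p => (p.1, p.2.items))

-- ===== PORT B =====
def get_hash_per_genre_alt (genres : List String) (plays : List Int) : List (String × List (Int × List Int)) :=
  let pairs := genres.zip plays
  (PySem.List.dedup (pairs.map (fun q => q.1))).map (fun g =>
    (g, (PySem.List.dedup ((pairs.filter (fun q => q.1 == g)).map (fun q => q.2))).map (fun p =>
      (p, ((PySem.List.enumerate pairs).filter (fun q => q.2 == (g, p))).map (fun q => q.1)))))

-- ===== PRECONDITION & SPEC =====
def Spec_get_hash_per_genre (genres : List String) (plays : List Int) (out : List (String × List (Int × List Int))) : Prop := out = get_hash_per_genre_alt genres plays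
instance (genres : List String) (plays : List Int) (out : List (String × List (Int × List Int))) : Decidable (Spec_get_hash_per_genre genres plays out) := by unfold Spec_get_hash_per_genre; infer_instance

-- ===== CLAIM =====
def Claim_equal_get_hash_per_genre : Prop := ∀ (genres : List String) (plays : List Int), Dom_get_hash_per_genre genres plays → Spec_get_hash_per_genre genres plays (get_hash_per_genre genres plays)

-- ===== LEMMAS AND PROOFS =====

-- canonical (modify) form of A's first-pass step
def pvStep (ht : PySem.Dict String (PySem.Dict Int (List Int))) (q : Int × (String × Int)) :
    PySem.Dict String (PySem.Dict Int (List Int)) :=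
  ht.insert q.2.1 ((ht.getD q.2.1 PySem.Dict.empty).modify q.2.2 [] (fun l => l ++ [q.1]))

theorem pvStep_eq (ht : PySem.Dict String (PySem.Dict Int (List Int))) (q : Int × (String × Int)) :
    (match ht.get? q.2.1 with
      | some inner =>
          match inner.get? q.2.2 with
          | some l => ht.insert q.2.1 (inner.insert q.2.2 (l ++ [q.1]))
          | none   => ht.insert q.2.1 (inner.insert q.2.2 [q.1])
      | none => ht.insert q.2.1 (PySem.Dict.ofList [(q.2.2, [q.1])]))
    = pvStep ht q := by
  unfold pvStep
  cases hg : ht.get? q.2.1 with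
  | none =>
    simp only [PySem.Dict.getD_eq_get?_getD, hg, Option.getD_none]
    rfl
  | some inner =>
    simp only [PySem.Dict.getD_eq_get?_getD, hg, Option.getD_some]
    cases hp : inner.get? q.2.2 with
    | none => simp [PySem.Dict.modify, PySem.Dict.getD_eq_get?_getD, hp]
    | some l => simp [PySem.Dict.modify, PySem.Dict.getD_eq_get?_getD, hp]

-- A's first-pass accumulator in canonical form
def pvHA (P : List (Int × (String × Int))) : PySem.Dict String (PySem.Dict Int (List Int)) :=
  P.foldl pvStep PySem.Dict.empty

-- getD through a fold of keyed inserts whose value reads the accumulator only at the same key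
theorem pv_getD_foldl_insert_key {κ β ν : Type} [BEq κ] [LawfulBEq κ] [DecidableEq κ]
    (l : List β) (key : β → κ) (f : ν → β → ν) (dflt : ν) (g : κ) :
    ∀ d : PySem.Dict κ ν,
      (l.foldl (fun d x => d.insert (key x) (f (d.getD (key x) dflt) x)) d).getD g dflt
        = (l.filter (fun x => key x == g)).foldl f (d.getD g dflt) := by
  induction l with
  | nil => intro d; simp
  | cons x l ih =>
    intro d
    by_cases h : key x = g
    · simp [h, ih]
    · simp [h, Ne.symm h, ih, PySem.Dict.getD_insert]

theorem pvHA_getD (P : List (Int × (String × Int))) (g : String) :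
    (pvHA P).getD g PySem.Dict.empty
      = (P.filter (fun q => q.2.1 == g)).foldl
          (fun d q => d.modify q.2.2 [] (fun l => l ++ [q.1])) PySem.Dict.empty := by
  have h := pv_getD_foldl_insert_key P (fun q => q.2.1)
    (fun d q => d.modify q.2.2 [] (fun l => l ++ [q.1])) (PySem.Dict.empty : PySem.Dict Int (List Int)) g PySem.Dict.empty
  simpa [pvHA, pvStep, PySem.Dict.getD_empty] using h

theorem pvHA_keys (P : List (Int × (String × Int))) :
    (pvHA P).keys = PySem.Set.ofList (P.map (fun q => q.2.1)) := by
  have h := PySem.Dict.keys_foldl_insert_key P (fun q => q.2.1)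
    (fun d q => (d.getD q.2.1 PySem.Dict.empty).modify q.2.2 [] (fun l => l ++ [q.1])) PySem.Dict.empty
  simpa [pvHA, pvStep, PySem.Set.update_nil_left] using h

theorem pvHA_nodup (P : List (Int × (String × Int))) : (pvHA P).keys.Nodup := by
  have h := PySem.Dict.nodup_keys_foldl_insert_key P (fun q => q.2.1)
    (fun d q => (d.getD q.2.1 PySem.Dict.empty).modify q.2.2 [] (fun l => l ++ [q.1])) PySem.Dict.empty (by simp)
  simpa [pvHA, pvStep] using h

theorem pvInner_keys (P : List (Int × (String × Int))) (g : String) :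
    ((pvHA P).getD g PySem.Dict.empty).keys
      = PySem.Set.ofList ((P.filter (fun q => q.2.1 == g)).map (fun q => q.2.2)) := by
  rw [pvHA_getD]
  have h := PySem.Dict.keys_foldl_modify_key (P.filter (fun q => q.2.1 == g)) (fun q => q.2.2)
    ([] : List Int) (fun _ q l => l ++ [q.1]) PySem.Dict.empty
  simpa [PySem.Set.update_nil_left] using h

theorem pvInner_nodup (P : List (Int × (String × Int))) (g : String) :
    ((pvHA P).getD g PySem.Dict.empty).keys.Nodup := by
  rw [pvHA_getD]
  exact PySem.Dict.nodup_keys_foldl_modify_key (P.filter (fun q => q.2.1 == g)) (fun q => q.2.2)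
    ([] : List Int) (fun _ q l => l ++ [q.1]) PySem.Dict.empty (by simp)

theorem pvInner_getD (P : List (Int × (String × Int))) (g : String) (p : Int) :
    ((pvHA P).getD g PySem.Dict.empty).getD p []
      = (P.filter (fun q => q.2.1 == g && q.2.2 == p)).map (fun q => q.1) := by
  rw [pvHA_getD]
  have h1 : (P.filter (fun q => q.2.1 == g)).foldl
      (fun d q => d.modify q.2.2 [] (fun l => l ++ [q.1])) (PySem.Dict.empty : PySem.Dict Int (List Int))
      = ((P.filter (fun q => q.2.1 == g)).map (fun q => (q.2.2, q.1))).foldl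
          (fun d r => d.modify r.1 [] (fun l => l ++ [r.2])) PySem.Dict.empty := by
    rw [List.foldl_map]
  rw [h1, PySem.Dict.getD_foldl_modify_append]
  simp only [PySem.Dict.getD_empty, List.nil_append, List.filter_map, List.map_map,
    List.filter_filter, Function.comp]
  rw [List.filter_congr (fun a _ => (Bool.and_comm (a.2.2 == p) (a.2.1 == g)))]
  exact List.map_congr_left (fun a _ => rfl)

-- overwriting a present key with its own value is the identity
theorem pv_insert_getD_self {κ ν : Type} [BEq κ] [LawfulBEq κ]
    (d : PySem.Dict κ ν) (k : κ) (v0 : ν) (hn : d.keys.Nodup) (hc : d.contains k = true) :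
    d.insert k (d.getD k v0) = d := by
  apply PySem.Dict.ext
  rw [PySem.Dict.items_insert_of_contains d (d.getD k v0) hc]
  have hmap : ∀ p ∈ d.items, (if p.1 == k then (k, d.getD k v0) else p) = p := by
    intro p hp
    obtain ⟨pk, pv⟩ := p
    by_cases h : pk = k
    · subst h
      rw [PySem.Dict.getD_of_mem_items d hp hn v0]
      simp
    · simp [h]
  rw [List.map_congr_left hmap]
  exact List.map_id' d.items

theorem pv_foldl_fixed {α β : Type} (f : α → β → α) (a : α) (l : List β)
    (h : ∀ x ∈ l, f a x = a) : l.foldl f a = a := by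
  induction l with
  | nil => rfl
  | cons x l ih => rw [List.foldl_cons, h x (by simp), ih (fun y hy => h y (by simp [hy]))]

-- filter/map through enumerate when the predicate and map only read the element
theorem pv_enum_filter_map {α β : Type} (xs : List α) (p : α → Bool) (h : α → β) (s : Int) :
    ((PySem.List.enumerate xs s).filter (fun q => p q.2)).map (fun q => h q.2)
      = (xs.filter p).map h := by
  induction xs generalizing s with
  | nil => rfl
  | cons x xs ih =>
    rw [PySem.List.enumerate_cons, List.filter_cons, List.filter_cons]
    cases hp : p x <;> simp [ih]

-- A's second pass leaves pvHA unchanged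
theorem pvA_pass2 (genres : List String) (plays : List Int) :
    (genres.zip plays).foldl (fun ht gp =>
      if 2 ≤ ((ht.getD gp.1 PySem.Dict.empty).getD gp.2 []).length then
        ht.insert gp.1 ((ht.getD gp.1 PySem.Dict.empty).insert gp.2
          (PySem.List.sorted ((ht.getD gp.1 PySem.Dict.empty).getD gp.2 []) (fun x => x)))
      else ht) (pvHA (PySem.List.enumerate (genres.zip plays)))
    = pvHA (PySem.List.enumerate (genres.zip plays)) := by
  apply pv_foldl_fixed
  intro gp hgp
  have hgp' : gp ∈ (PySem.List.enumerate (genres.zip plays)).map (fun x => x.2) := by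
    rw [PySem.List.map_snd_enumerate]; exact hgp
  obtain ⟨q, hqP, hq2⟩ := List.mem_map.mp hgp'
  have hcout : (pvHA (PySem.List.enumerate (genres.zip plays))).contains gp.1 = true := by
    rw [PySem.Dict.contains_iff_mem_keys, pvHA_keys]
    exact (PySem.Set.mem_ofList _ _).mpr (List.mem_map.mpr ⟨q, hqP, by rw [hq2]⟩)
  have hcin : ((pvHA (PySem.List.enumerate (genres.zip plays))).getD gp.1 PySem.Dict.empty).contains gp.2 = true := by
    rw [PySem.Dict.contains_iff_mem_keys, pvInner_keys]
    refine (PySem.Set.mem_ofList _ _).mpr (List.mem_map.mpr ⟨q, List.mem_filter.mpr ⟨hqP, by simp [hq2]⟩, by rw [hq2]⟩)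
  have hsorted : PySem.List.sorted
      (((pvHA (PySem.List.enumerate (genres.zip plays))).getD gp.1 PySem.Dict.empty).getD gp.2 []) (fun x => x)
      = ((pvHA (PySem.List.enumerate (genres.zip plays))).getD gp.1 PySem.Dict.empty).getD gp.2 [] := by
    rw [pvInner_getD]
    refine PySem.List.sorted_eq_self_of_pairwise _ _ ?_
    refine List.Pairwise.map _ (fun a b hab => le_of_lt hab)
      (List.Pairwise.filter _ (PySem.List.pairwise_lt_enumerate (genres.zip plays) 0))
  by_cases h2 : 2 ≤ (((pvHA (PySem.List.enumerate (genres.zip plays))).getD gp.1 PySem.Dict.empty).getD gp.2 []).length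
  · rw [if_pos h2, hsorted, pv_insert_getD_self _ gp.2 [] (pvInner_nodup _ gp.1) hcin,
      pv_insert_getD_self _ gp.1 PySem.Dict.empty (pvHA_nodup _) hcout]
  · rw [if_neg h2]

-- ===== VERDICT =====
theorem get_hash_per_genre_spec : Claim_equal_get_hash_per_genre := by
  intro genres plays _
  show get_hash_per_genre genres plays = get_hash_per_genre_alt genres plays
  have hstep : (fun (ht : PySem.Dict String (PySem.Dict Int (List Int))) (q : Int × (String × Int)) =>
      match ht.get? q.2.1 with
      | some inner =>
          match inner.get? q.2.2 with
          | some l => ht.insert q.2.1 (inner.insert q.2.2 (l ++ [q.1]))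
          | none   => ht.insert q.2.1 (inner.insert q.2.2 [q.1])
      | none => ht.insert q.2.1 (PySem.Dict.ofList [(q.2.2, [q.1])])) = pvStep := by
    funext ht q; exact pvStep_eq ht q
  show ((genres.zip plays).foldl (fun ht gp =>
      if 2 ≤ ((ht.getD gp.1 PySem.Dict.empty).getD gp.2 []).length then
        ht.insert gp.1 ((ht.getD gp.1 PySem.Dict.empty).insert gp.2
          (PySem.List.sorted ((ht.getD gp.1 PySem.Dict.empty).getD gp.2 []) (fun x => x)))
      else ht)
      ((PySem.List.enumerate (genres.zip plays)).foldl (fun ht q =>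
        match ht.get? q.2.1 with
        | some inner =>
            match inner.get? q.2.2 with
            | some l => ht.insert q.2.1 (inner.insert q.2.2 (l ++ [q.1]))
            | none   => ht.insert q.2.1 (inner.insert q.2.2 [q.1])
        | none => ht.insert q.2.1 (PySem.Dict.ofList [(q.2.2, [q.1])])) PySem.Dict.empty)).items.map
        (fun p => (p.1, p.2.items))
    = (PySem.List.dedup ((genres.zip plays).map (fun q => q.1))).map (fun g =>
        (g, (PySem.List.dedup (((genres.zip plays).filter (fun q => q.1 == g)).map (fun q => q.2))).map (fun p =>
          (p, ((PySem.List.enumerate (genres.zip plays)).filter (fun q => q.2 == (g, p))).map (fun q => q.1)))))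
  rw [hstep]
  rw [show (PySem.List.enumerate (genres.zip plays)).foldl pvStep PySem.Dict.empty
      = pvHA (PySem.List.enumerate (genres.zip plays)) from rfl]
  rw [pvA_pass2]
  rw [PySem.Dict.items_eq_map_keys _ (pvHA_nodup _) PySem.Dict.empty, pvHA_keys, List.map_map]
  simp only [PySem.List.dedup_eq_ofList]
  have hk : (PySem.List.enumerate (genres.zip plays)).map (fun q => q.2.1)
      = (genres.zip plays).map (fun q => q.1) := by
    rw [show (fun (q : Int × (String × Int)) => q.2.1)
        = (fun (r : String × Int) => r.1) ∘ (fun (q : Int × (String × Int)) => q.2) from rfl,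
      ← List.map_map, PySem.List.map_snd_enumerate]
  rw [hk]
  apply List.map_congr_left
  intro g hgmem
  simp only [Function.comp_apply]
  rw [PySem.Dict.items_eq_map_keys _ (pvInner_nodup _ g) ([] : List Int), pvInner_keys]
  rw [pv_enum_filter_map (genres.zip plays) (fun x => x.1 == g) (fun x => x.2) 0]
  congr 1
  apply List.map_congr_left
  intro p hpmem
  rw [pvInner_getD]
  have hf : (PySem.List.enumerate (genres.zip plays)).filter (fun q => q.2.1 == g && q.2.2 == p)
      = (PySem.List.enumerate (genres.zip plays)).filter (fun q => q.2 == (g, p)) := by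
    apply List.filter_congr
    intro q _
    obtain ⟨i, a, b⟩ := q
    rfl
  rw [hf]
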